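-- pv_equiv track=rewrite | github.com/Raphael-pix/code-sprints | problems/hard/morgan_and_string/morgan_string.py | morganAndString
-- ===== SOURCE A (Python) =====
-- def morganAndString(a, b):
--     result = []
--     i, j = 0, 0
--     while i < len(a) and j < len(b):
--         if a[i:] <= b[j:]:
--             result.append(a[i])
--             i += 1
--         else:
--             result.append(b[j])
--             j += 1
--     result.append(a[i:])
--     result.append(b[j:])
--     return ''.join(result)
-- ===== SOURCE B (Python) =====
-- def morganAndString(a, b):
--     n, m = len(a), len(b)
--     # DP: rows[i][j] == 1  iff  a[i:] <= b[j:], computed bottom-up row by row.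
--     rows = [bytearray(m + 1) for _ in range(n + 1)]
--     for j in range(m + 1):
--         rows[n][j] = 1
--     for i in range(n - 1, -1, -1):
--         row, nxt = rows[i], rows[i + 1]
--         ai = a[i]
--         for j in range(m - 1, -1, -1):
--             bj = b[j]
--             row[j] = 1 if (ai < bj or (ai == bj and nxt[j + 1])) else 0
--     out = []
--     i = j = 0
--     while i < n and j < m:
--         if rows[i][j]:
--             out.append(a[i])
--             i += 1
--         else:
--             out.append(b[j])
--             j += 1
--     out.append(a[i:])
--     out.append(b[j:])
--     return ''.join(out)
-- ===== Notes on version B (the rewrite author's own statement) =====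
-- stated objective: alternative
-- what changed: Replaces A's repeated full suffix comparisons a[i:] <= b[j:] inside the greedy merge loop by a bottom-up dynamic-programming table of all suffix-comparison outcomes (rows[i][j] iff a[i:] <= b[j:]), so each greedy step is an O(1) table lookup.
import Mathlib
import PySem

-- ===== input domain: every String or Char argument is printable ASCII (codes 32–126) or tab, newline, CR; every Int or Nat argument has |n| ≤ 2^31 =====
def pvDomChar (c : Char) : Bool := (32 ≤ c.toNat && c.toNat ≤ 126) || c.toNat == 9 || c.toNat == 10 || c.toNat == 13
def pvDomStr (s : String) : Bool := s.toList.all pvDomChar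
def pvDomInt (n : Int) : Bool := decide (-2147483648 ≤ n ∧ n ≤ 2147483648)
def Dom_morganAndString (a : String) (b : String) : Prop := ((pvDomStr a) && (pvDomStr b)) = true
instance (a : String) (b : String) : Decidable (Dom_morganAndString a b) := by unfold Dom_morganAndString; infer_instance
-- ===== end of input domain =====

-- B replaces A's repeated O(n) suffix comparisons by a bottom-up DP table of all
-- suffix-comparison outcomes, read off in O(1) per greedy step (objective: alternative).

-- ===== PORT A =====
-- while i < len(a) and j < len(b): compare a[i:] <= b[j:] (Python str order = lex order
-- on char lists), append the taken character; returns (result, i, j) at loop exit.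
def pvLoopA (la lb : List Char) (i j : Nat) (res : List (List Char)) :
    List (List Char) × Nat × Nat :=
  if h : i < la.length ∧ j < lb.length then
    if PySem.List.slice la (some (i : Int)) none ≤ PySem.List.slice lb (some (j : Int)) none then
      pvLoopA la lb (i + 1) j (res ++ [[la[i]'h.1]])
    else
      pvLoopA la lb i (j + 1) (res ++ [[lb[j]'h.2]])
  else
    (res, i, j)
termination_by (la.length - i) + (lb.length - j)
decreasing_by all_goals omega

def morganAndString (a : String) (b : String) : String :=
  let la := a.toList
  let lb := b.toList
  let r := pvLoopA la lb 0 0 []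
  let res := r.1 ++ [PySem.List.slice la (some (r.2.1 : Int)) none]   -- result.append(a[i:])
  let res := res ++ [PySem.List.slice lb (some (r.2.2 : Int)) none]   -- result.append(b[j:])
  String.ofList res.flatten                                               -- ''.join(result)

-- ===== PORT B =====
-- row i of the DP table from b and row i+1 shifted by one: row[j] = a[i] < b[j] or
-- (a[i] == b[j] and nxt[j+1]); the final cell row[m] is 0 (false).
def pvRowB (ai : Char) : List Char → List Bool → List Bool
  | [], _ => [false]
  | c :: bs, ns => (decide (ai < c) || (decide (ai = c) && ns.headD false)) :: pvRowB ai bs ns.tail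

-- rows[n] is all-ones; rows[i] is built from rows[i+1] (bottom-up over the suffixes of a)
def pvTableB (lb : List Char) : List Char → List (List Bool)
  | [] => [List.replicate (lb.length + 1) true]
  | ai :: as' =>
      let t := pvTableB lb as'
      pvRowB ai lb ((t.headD []).tail) :: t

-- the same greedy loop, but the branch reads rows[i][j] instead of comparing suffixes
def pvLoopB (la lb : List Char) (t : List (List Bool)) (i j : Nat) (res : List Char) :
    List Char × Nat × Nat :=
  if h : i < la.length ∧ j < lb.length then
    if (t.getD i []).getD j false then
      pvLoopB la lb t (i + 1) j (res ++ [la[i]'h.1])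
    else
      pvLoopB la lb t i (j + 1) (res ++ [lb[j]'h.2])
  else
    (res, i, j)
termination_by (la.length - i) + (lb.length - j)
decreasing_by all_goals omega

def morganAndString_alt (a : String) (b : String) : String :=
  let la := a.toList
  let lb := b.toList
  let t := pvTableB lb la
  let r := pvLoopB la lb t 0 0 []
  String.ofList (r.1 ++ la.drop r.2.1 ++ lb.drop r.2.2)   -- out + a[i:] + b[j:], joined

-- ===== PRECONDITION & SPEC =====
def Spec_morganAndString (a : String) (b : String) (out : String) : Prop := out = morganAndString_alt a b
instance (a : String) (b : String) (out : String) : Decidable (Spec_morganAndString a b out) := by unfold Spec_morganAndString; infer_instance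

-- ===== CLAIM (what is proved, stated in full; the proofs are below) =====
def Claim_equal_morganAndString : Prop := ∀ (a : String) (b : String), Dom_morganAndString a b → Spec_morganAndString a b (morganAndString a b)

-- ===== LEMMAS AND PROOFS =====

lemma pv_tail_getD {α : Type} (ns : List α) (k : Nat) (d : α) :
    ns.tail.getD k d = ns.getD (k + 1) d := by
  cases ns <;> simp [List.getD]

lemma pv_cons_le_cons (x y : Char) (xs ys : List Char) :
    (x :: xs ≤ y :: ys) ↔ (x < y ∨ (x = y ∧ xs ≤ ys)) := by
  simp only [← Std.not_lt, List.cons_lt_cons_iff]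
  rcases lt_trichotomy x y with h|h|h
  · simp [h, ne_of_gt h, asymm h]
  · simp [h]
  · simp [h, ne_of_gt h, asymm h]

lemma pv_nil_le (xs : List Char) : ([] : List Char) ≤ xs := by
  rw [← Std.not_lt]; exact List.not_lt_nil xs

lemma pv_not_cons_le_nil (x : Char) (xs : List Char) : ¬ (x :: xs ≤ ([] : List Char)) := by
  rw [← Std.not_lt]; simp [List.nil_lt_cons]

lemma pvRowB_getD (ai : Char) (as' : List Char) :
    ∀ (bs : List Char) (ns : List Bool),
      (∀ k, k + 1 ≤ bs.length → ns.getD k false = decide (as' ≤ bs.drop (k + 1))) →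
      ∀ j, (pvRowB ai bs ns).getD j false = decide ((ai :: as') ≤ bs.drop j) := by
  intro bs
  induction bs with
  | nil =>
    intro ns _ j
    cases j with
    | zero => simp [pvRowB, List.getD, pv_not_cons_le_nil]
    | succ k => simp [pvRowB, List.getD, pv_not_cons_le_nil]
  | cons c bs ih =>
    intro ns hns j
    cases j with
    | zero =>
      have h0 : ns.headD false = ns.getD 0 false := by cases ns <;> simp [List.getD]
      have := hns 0 (by simp)
      simp only [pvRowB, List.getD_cons_zero, List.drop_zero]
      rw [h0, this]
      simp [pv_cons_le_cons, Bool.decide_or, Bool.decide_and]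
    | succ k =>
      simp only [pvRowB, List.getD_cons_succ, List.drop_succ_cons]
      exact ih ns.tail
        (fun k' hk' => by
          rw [pv_tail_getD, hns (k' + 1) (by simpa using hk')]
          simp) k

lemma pvTableB_getD (lb : List Char) :
    ∀ (as' : List Char) (i j : Nat), i ≤ as'.length → j ≤ lb.length →
      (((pvTableB lb as').getD i []).getD j false) = decide (as'.drop i ≤ lb.drop j) := by
  intro as'
  induction as' with
  | nil =>
    intro i j hi hj
    have hi0 : i = 0 := by simpa using hi
    subst hi0
    simp [pvTableB, List.getD, Nat.lt_succ_of_le hj, pv_nil_le]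
  | cons ai as' ih =>
    intro i j hi hj
    cases i with
    | zero =>
      simp only [pvTableB, List.getD_cons_zero, List.drop_zero]
      refine pvRowB_getD ai as' lb ((pvTableB lb as').headD []).tail ?_ j
      intro k hk
      have hhead : ((pvTableB lb as').headD []) = (pvTableB lb as').getD 0 [] := by
        cases h : pvTableB lb as' <;> simp [List.getD]
      rw [pv_tail_getD, hhead, ih 0 (k + 1) (Nat.zero_le _) hk]
      simp
    | succ i' =>
      simp only [pvTableB, List.getD_cons_succ, List.drop_succ_cons]
      exact ih i' j (by simpa using hi) hj

lemma pvLoop_eq (la lb : List Char) :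
    ∀ (i j : Nat) (resA : List (List Char)),
      i ≤ la.length → j ≤ lb.length →
      pvLoopB la lb (pvTableB lb la) i j resA.flatten =
        ((pvLoopA la lb i j resA).1.flatten, (pvLoopA la lb i j resA).2) := by
  intro i j
  induction hm : (la.length - i) + (lb.length - j) using Nat.strong_induction_on
    generalizing i j with
  | _ n ih =>
    intro resA hi hj
    rw [pvLoopA, pvLoopB]
    by_cases h : i < la.length ∧ j < lb.length
    · have hcond : ((pvTableB lb la).getD i []).getD j false =
          decide (la.drop i ≤ lb.drop j) := pvTableB_getD lb la i j hi hj
      simp only [dif_pos h]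
      rw [hcond]
      rw [PySem.List.slice_from_natCast, PySem.List.slice_from_natCast]
      by_cases hc : la.drop i ≤ lb.drop j
      · simp only [hc, decide_true, if_true]
        have : (resA ++ [[la[i]'h.1]]).flatten = resA.flatten ++ [la[i]'h.1] := by simp
        rw [← this, ih _ (by omega) (i + 1) j rfl _ (by omega) (by omega)]
      · simp only [hc, decide_false, Bool.false_eq_true, if_false]
        have : (resA ++ [[lb[j]'h.2]]).flatten = resA.flatten ++ [lb[j]'h.2] := by simp
        rw [← this, ih _ (by omega) i (j + 1) rfl _ (by omega) (by omega)]
    · simp only [dif_neg h]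

-- ===== VERDICT (by name: the statement is the Claim_ definition above) =====
theorem morganAndString_spec : Claim_equal_morganAndString := by
  intro a b _
  unfold Spec_morganAndString morganAndString morganAndString_alt
  have h := pvLoop_eq a.toList b.toList 0 0 [] (Nat.zero_le _) (Nat.zero_le _)
  simp only [List.flatten_nil] at h
  dsimp only
  rw [h]
  simp [PySem.List.slice_from_natCast]
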